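-- pv_equiv track=rewrite | github.com/cauchyswartz/LisaCodingLibrary | active/artifact_optimizer.py | third_level
-- ===== SOURCE A (Python) =====
-- def crcd_rolls_dmg(_rolls_cr, _rolls_cd, _curr_stats):
--   return (1-_rolls_cr)+(_rolls_cr)*(_rolls_cd)
--
-- def third_level(rolls_used, curr_stats,
--                 rolls_cap=None):
--   curr_max_dmg = 1
--   curr_max_config = None
--   for i in range(rolls_used):
--     new_dmg = crcd_rolls_dmg(i,rolls_used-i,curr_stats)
--     if (curr_max_dmg < new_dmg):
--       curr_max_dmg = new_dmg
--       curr_max_config = i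
--   return (curr_max_dmg, curr_max_config)
-- ===== SOURCE B (Python) =====
-- def third_level(rolls_used, curr_stats, rolls_cap=None):
--     # Concave quadratic f(i) = (1-i) + i*(rolls_used-i) over i in range(rolls_used):
--     # maximum at the integer nearest the vertex (rolls_used-1)/2 (tie -> smaller i,
--     # which is the first occurrence). f exceeds the initial 1 only when rolls_used >= 3.
--     if rolls_used <= 2:
--         return (1, None)
--     i = (rolls_used - 1) // 2
--     return (1 - i + i * (rolls_used - i), i)
-- ===== Notes on version B (the rewrite author's own statement) =====
-- stated objective: faster
-- what changed: Replaces the O(n) scan over all roll splits by an O(1) closed form: the damage is a concave quadratic in i, so B evaluates it at floor((rolls_used-1)/2), the first-occurring integer maximizer, and returns (1, None) when rolls_used <= 2 where no split beats the initial 1.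
import Mathlib
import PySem

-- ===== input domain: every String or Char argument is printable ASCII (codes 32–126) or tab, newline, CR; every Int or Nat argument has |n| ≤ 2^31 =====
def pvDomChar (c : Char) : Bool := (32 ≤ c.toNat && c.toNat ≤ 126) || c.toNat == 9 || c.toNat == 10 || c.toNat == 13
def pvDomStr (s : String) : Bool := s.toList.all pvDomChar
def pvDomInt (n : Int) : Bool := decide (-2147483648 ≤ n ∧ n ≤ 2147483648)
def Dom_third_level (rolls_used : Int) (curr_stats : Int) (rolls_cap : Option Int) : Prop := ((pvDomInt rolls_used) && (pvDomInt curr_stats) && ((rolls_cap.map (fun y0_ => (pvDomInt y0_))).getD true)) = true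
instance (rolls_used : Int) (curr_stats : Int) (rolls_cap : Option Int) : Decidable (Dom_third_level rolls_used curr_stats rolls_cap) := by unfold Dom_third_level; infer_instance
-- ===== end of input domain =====

-- B replaces A's O(n) scan over roll splits by evaluating the concave quadratic at its
-- integer vertex in O(1) (faster: asymptotic).


-- ===== PORT A =====
def crcd_rolls_dmg (_rolls_cr : Int) (_rolls_cd : Int) (_curr_stats : Int) : Int :=
  (1 - _rolls_cr) + _rolls_cr * _rolls_cd

def third_level (rolls_used : Int) (curr_stats : Int) (rolls_cap : Option Int) : Int × Option Int :=
  (PySem.List.pyRange 0 rolls_used 1).foldl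
    (fun st i =>
      let new_dmg := crcd_rolls_dmg i (rolls_used - i) curr_stats
      if st.1 < new_dmg then (new_dmg, some i) else st)
    (1, none)

-- ===== PORT B =====
def third_level_alt (rolls_used : Int) (curr_stats : Int) (rolls_cap : Option Int) : Int × Option Int :=
  if rolls_used ≤ 2 then (1, none)
  else
    let i := PySem.Int.floordiv (rolls_used - 1) 2
    (1 - i + i * (rolls_used - i), some i)

-- ===== PRECONDITION & SPEC =====
def Spec_third_level (rolls_used : Int) (curr_stats : Int) (rolls_cap : Option Int) (out : Int × Option Int) : Prop := out = third_level_alt rolls_used curr_stats rolls_cap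
instance (rolls_used : Int) (curr_stats : Int) (rolls_cap : Option Int) (out : Int × Option Int) : Decidable (Spec_third_level rolls_used curr_stats rolls_cap out) := by unfold Spec_third_level; infer_instance

-- ===== CLAIM (what is proved, stated in full; the proofs are below) =====
def Claim_equal_third_level : Prop := ∀ (rolls_used : Int) (curr_stats : Int) (rolls_cap : Option Int), Dom_third_level rolls_used curr_stats rolls_cap → Spec_third_level rolls_used curr_stats rolls_cap (third_level rolls_used curr_stats rolls_cap)

-- ===== LEMMAS AND PROOFS =====

-- Loop invariant for A's scan when rolls_used = n ≥ 3, with m = (n-1)//2: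
-- the state after processing i = 0 .. k-1 is (1, none) for k ≤ 1, (f (k-1), some (k-1))
-- while still in the strictly increasing phase, and frozen at (f m, some m) after the vertex.
theorem third_level_loop_inv (n c : Int) (hn : 3 ≤ n) (m : Int)
    (hm : n - 1 = 2 * m ∨ n - 1 = 2 * m + 1) :
    ∀ k : Nat, (k : Int) ≤ n →
      (PySem.List.pyRange 0 (k : Int) 1).foldl
        (fun st i =>
          let new_dmg := crcd_rolls_dmg i (n - i) c
          if st.1 < new_dmg then (new_dmg, some i) else st)
        (1, none)
        =
      (if (k : Int) ≤ 1 then (1, (none : Option Int))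
       else if (k : Int) ≤ m + 1 then
         ((1 - ((k : Int) - 1)) + ((k : Int) - 1) * (n - ((k : Int) - 1)), some ((k : Int) - 1))
       else ((1 - m) + m * (n - m), some m)) := by
  have hm1 : 1 ≤ m := by omega
  intro k
  induction k with
  | zero =>
    intro _
    simp [PySem.List.pyRange_one_eq_nil]
  | succ k ih =>
    intro hk
    have hk' : (k : Int) ≤ n := by push_cast at hk ⊢; omega
    have hsplit : PySem.List.pyRange 0 ((k : Int) + 1) 1
        = PySem.List.pyRange 0 (k : Int) 1 ++ [(k : Int)] :=
      PySem.List.pyRange_one_succ_right (by positivity)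
    push_cast
    rw [hsplit, List.foldl_append, ih hk']
    simp only [List.foldl_cons, List.foldl_nil, crcd_rolls_dmg]
    rcases Nat.lt_or_ge k 1 with h0 | h1
    · -- k = 0 : f 0 = 1, no update
      interval_cases k
      norm_num
    · rcases Nat.lt_or_ge k 2 with h1' | h2
      · -- k = 1 : f 1 = n - 1 > 1, first update
        interval_cases k
        simp only [Nat.cast_one]
        rw [if_pos (le_refl (1:Int)),
            if_pos (show (1:Int) < (1 - 1) + 1 * (n - 1) by omega),
            if_neg (by omega : ¬ ((1:Int) + 1 ≤ 1)),
            if_pos (by omega : (1:Int) + 1 ≤ m + 1)]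
        norm_num
      · -- 2 ≤ k
        have hk2 : (2 : Int) ≤ (k : Int) := by exact_mod_cast h2
        rw [if_neg (by omega : ¬ ((k : Int) ≤ 1)), if_neg (by omega : ¬ ((k : Int) + 1 ≤ 1))]
        rcases le_or_gt ((k : Int)) m with hkm | hkm
        · -- strictly increasing phase: update to i = k
          rw [if_pos (by omega : (k : Int) ≤ m + 1)]
          have hlt : (1 - ((k : Int) - 1)) + ((k : Int) - 1) * (n - ((k : Int) - 1))
              < (1 - (k : Int)) + (k : Int) * (n - (k : Int)) := by
            have hid : ((1 - (k : Int)) + (k : Int) * (n - (k : Int)))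
                - ((1 - ((k : Int) - 1)) + ((k : Int) - 1) * (n - ((k : Int) - 1)))
                = n - 2 * (k : Int) := by ring
            have : (0 : Int) < n - 2 * (k : Int) := by omega
            omega
          rw [if_pos hlt, if_pos (by omega : (k : Int) + 1 ≤ m + 1)]
          norm_num
        · rcases eq_or_lt_of_le (by omega : m + 1 ≤ (k : Int)) with hkm1 | hkm1
          · -- k = m + 1 : f (m+1) ≤ f m, no update; state was (f m, some m)
            rw [if_pos (by omega : (k : Int) ≤ m + 1)]
            have hle : ¬ ((1 - ((k : Int) - 1)) + ((k : Int) - 1) * (n - ((k : Int) - 1))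
                < (1 - (k : Int)) + (k : Int) * (n - (k : Int))) := by
              have hid : ((1 - (k : Int)) + (k : Int) * (n - (k : Int)))
                  - ((1 - ((k : Int) - 1)) + ((k : Int) - 1) * (n - ((k : Int) - 1)))
                  = n - 2 * (k : Int) := by ring
              omega
            rw [if_neg hle, if_neg (by omega : ¬ ((k : Int) + 1 ≤ m + 1))]
            rw [show (k : Int) - 1 = m by omega]
          · -- k ≥ m + 2 : f k < f m, no update
            rw [if_neg (by omega : ¬ ((k : Int) ≤ m + 1)),
                if_neg (by omega : ¬ ((k : Int) + 1 ≤ m + 1))]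
            have hle : ¬ ((1 - m) + m * (n - m) < (1 - (k : Int)) + (k : Int) * (n - (k : Int))) := by
              have hprod : (0 : Int) ≤ ((k : Int) - m) * ((k : Int) + m - (n - 1)) :=
                mul_nonneg (by omega) (by omega)
              nlinarith [hprod]
            rw [if_neg hle]

-- ===== VERDICT (by name: the statement is the Claim_ definition above) =====
theorem third_level_spec : Claim_equal_third_level := by
  intro n c cap _
  show third_level n c cap = third_level_alt n c cap
  unfold third_level third_level_alt
  rcases le_or_gt n 2 with hle | hgt
  · rw [if_pos hle]
    rcases le_or_gt n 0 with h0 | h0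
    · rw [PySem.List.pyRange_one_eq_nil h0]; rfl
    · interval_cases n <;>
        simp [PySem.List.pyRange_one_cons, PySem.List.pyRange_one_eq_nil, crcd_rolls_dmg]
  · rw [if_neg (by omega)]
    have hn3 : 3 ≤ n := by omega
    set m := PySem.Int.floordiv (n - 1) 2 with hmdef
    have hmd : m = (n - 1) / 2 := by
      rw [hmdef, PySem.Int.floordiv_eq_ediv_of_pos (by norm_num)]
    have hm : n - 1 = 2 * m ∨ n - 1 = 2 * m + 1 := by omega
    have hN : ((n.toNat : Int)) = n := Int.toNat_of_nonneg (by omega)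
    have := third_level_loop_inv n c hn3 m hm n.toNat (by omega)
    rw [hN] at this
    rw [this, if_neg (by omega : ¬ (n ≤ 1)), if_neg (by omega : ¬ (n ≤ m + 1))]
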